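-- pv_equiv track=rewrite | github.com/krzem5/Assembly-Single_Task_Kernel | kfs2.py | _compute_bitmap_offsets
-- ===== SOURCE A (Python) =====
-- KFS2_BITMAP_LEVEL_COUNT=5
--
-- def _compute_bitmap_offsets(inode_allocation_bitmap,data_block_allocation_bitmap):
-- 	offset=0
-- 	inode_allocation_bitmap_offsets=[]
-- 	data_block_allocation_bitmap_offsets=[]
-- 	for i in range(0,KFS2_BITMAP_LEVEL_COUNT):
-- 		inode_allocation_bitmap_offsets.append(offset)
-- 		offset+=inode_allocation_bitmap[i]
-- 	for i in range(0,KFS2_BITMAP_LEVEL_COUNT):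
-- 		data_block_allocation_bitmap_offsets.append(offset)
-- 		offset+=data_block_allocation_bitmap[i]
-- 	return inode_allocation_bitmap_offsets,data_block_allocation_bitmap_offsets
-- ===== SOURCE B (Python) =====
-- KFS2_BITMAP_LEVEL_COUNT=5
--
-- def _compute_bitmap_offsets(inode_allocation_bitmap,data_block_allocation_bitmap):
-- 	inode_allocation_bitmap_offsets=[sum(inode_allocation_bitmap[j] for j in range(i)) for i in range(KFS2_BITMAP_LEVEL_COUNT)]
-- 	base=sum(inode_allocation_bitmap[j] for j in range(KFS2_BITMAP_LEVEL_COUNT))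
-- 	data_block_allocation_bitmap_offsets=[base+sum(data_block_allocation_bitmap[j] for j in range(i)) for i in range(KFS2_BITMAP_LEVEL_COUNT)]
-- 	return inode_allocation_bitmap_offsets,data_block_allocation_bitmap_offsets
-- ===== Notes on version B (the rewrite author's own statement) =====
-- stated objective: alternative
-- what changed: Replaces A's single running-offset accumulator threaded through two append loops by independent closed-form entries: each offset is computed from scratch as the partial sum of the preceding bitmap entries (and a base total for the second list), with no shared mutable state.
import Mathlib
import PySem

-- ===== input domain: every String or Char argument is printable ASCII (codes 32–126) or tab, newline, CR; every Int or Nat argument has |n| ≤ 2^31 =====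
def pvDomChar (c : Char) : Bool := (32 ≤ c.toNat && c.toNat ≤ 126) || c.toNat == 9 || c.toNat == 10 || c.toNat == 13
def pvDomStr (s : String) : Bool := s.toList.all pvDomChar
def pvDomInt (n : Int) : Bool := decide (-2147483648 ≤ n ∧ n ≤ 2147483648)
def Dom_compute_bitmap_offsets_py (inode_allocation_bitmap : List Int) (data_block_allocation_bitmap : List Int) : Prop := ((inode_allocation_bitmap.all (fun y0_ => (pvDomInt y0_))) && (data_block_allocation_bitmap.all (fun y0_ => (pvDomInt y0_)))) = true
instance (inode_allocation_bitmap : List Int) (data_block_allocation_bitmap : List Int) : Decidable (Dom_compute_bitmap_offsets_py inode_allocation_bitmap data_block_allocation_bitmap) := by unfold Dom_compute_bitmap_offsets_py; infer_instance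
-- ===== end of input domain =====

-- B replaces A's running accumulator by independent closed-form partial sums per offset (alternative decomposition, same practical cost at k=5).


-- ===== PORT A =====
-- Port of A: two stateful loops over range(0,5), each appending the running offset
-- then adding bitmap[i]. Indexing uses pyGet? (none = IndexError); Pre_ guarantees
-- the index is in range, so the .getD 0 default is never taken on admitted inputs.
def compute_bitmap_offsets_py (inode_allocation_bitmap : List Int) (data_block_allocation_bitmap : List Int) : List Int × List Int :=
  let s1 := (PySem.List.pyRange 0 5 1).foldl
    (fun (st : Int × List Int) i =>
      (st.1 + (PySem.List.pyGet? inode_allocation_bitmap i).getD 0, st.2 ++ [st.1]))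
    (0, [])
  let s2 := (PySem.List.pyRange 0 5 1).foldl
    (fun (st : Int × List Int) i =>
      (st.1 + (PySem.List.pyGet? data_block_allocation_bitmap i).getD 0, st.2 ++ [st.1]))
    (s1.1, [])
  (s1.2, s2.2)

-- ===== PORT B =====
-- Port of B: every offset computed independently as a closed-form partial sum
-- (sum over range(i) of the indexed entries), plus a base total for the second list.
def compute_bitmap_offsets_py_alt (inode_allocation_bitmap : List Int) (data_block_allocation_bitmap : List Int) : List Int × List Int :=
  let inodeOffsets := (PySem.List.pyRange 0 5 1).map (fun i =>
    ((PySem.List.pyRange 0 i 1).map (fun j => (PySem.List.pyGet? inode_allocation_bitmap j).getD 0)).sum)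
  let base := ((PySem.List.pyRange 0 5 1).map (fun j => (PySem.List.pyGet? inode_allocation_bitmap j).getD 0)).sum
  let dataOffsets := (PySem.List.pyRange 0 5 1).map (fun i =>
    base + ((PySem.List.pyRange 0 i 1).map (fun j => (PySem.List.pyGet? data_block_allocation_bitmap j).getD 0)).sum)
  (inodeOffsets, dataOffsets)

-- ===== PRECONDITION & SPEC =====
-- Pre_ excludes exactly the inputs where A raises IndexError: a bitmap shorter than 5.
def Pre_compute_bitmap_offsets_py (inode_allocation_bitmap : List Int) (data_block_allocation_bitmap : List Int) : Prop :=
  5 ≤ inode_allocation_bitmap.length ∧ 5 ≤ data_block_allocation_bitmap.length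
instance (inode_allocation_bitmap : List Int) (data_block_allocation_bitmap : List Int) : Decidable (Pre_compute_bitmap_offsets_py inode_allocation_bitmap data_block_allocation_bitmap) := by unfold Pre_compute_bitmap_offsets_py; infer_instance
def pvWitness_compute_bitmap_offsets_py : List Int × List Int := ([1, 2, 3, 4, 5], [6, 7, 8, 9, 10])

def Spec_compute_bitmap_offsets_py (inode_allocation_bitmap : List Int) (data_block_allocation_bitmap : List Int) (out : List Int × List Int) : Prop := out = compute_bitmap_offsets_py_alt inode_allocation_bitmap data_block_allocation_bitmap
instance (inode_allocation_bitmap : List Int) (data_block_allocation_bitmap : List Int) (out : List Int × List Int) : Decidable (Spec_compute_bitmap_offsets_py inode_allocation_bitmap data_block_allocation_bitmap out) := by unfold Spec_compute_bitmap_offsets_py; infer_instance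

-- ===== CLAIM (what is proved, stated in full; the proofs are below) =====
def Claim_equal_compute_bitmap_offsets_py : Prop := ∀ (inode_allocation_bitmap : List Int) (data_block_allocation_bitmap : List Int), Dom_compute_bitmap_offsets_py inode_allocation_bitmap data_block_allocation_bitmap → Pre_compute_bitmap_offsets_py inode_allocation_bitmap data_block_allocation_bitmap → Spec_compute_bitmap_offsets_py inode_allocation_bitmap data_block_allocation_bitmap (compute_bitmap_offsets_py inode_allocation_bitmap data_block_allocation_bitmap)
-- ===== LEMMAS AND PROOFS =====
set_option maxHeartbeats 2000000 in
theorem compute_bitmap_offsets_py_spec : Claim_equal_compute_bitmap_offsets_py := by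
  intro a b _ hpre
  obtain ⟨ha, hb⟩ := hpre
  match a, ha with
  | a0 :: a1 :: a2 :: a3 :: a4 :: _, _ =>
    match b, hb with
    | b0 :: b1 :: b2 :: b3 :: b4 :: _, _ =>
      show Spec_compute_bitmap_offsets_py _ _ _
      simp only [Spec_compute_bitmap_offsets_py, compute_bitmap_offsets_py,
        compute_bitmap_offsets_py_alt,
        show PySem.List.pyRange 0 5 1 = [0, 1, 2, 3, 4] from by decide]
      norm_num [List.foldl, PySem.List.pyGet?, PySem.List.pyIdx?, List.map, List.sum]
      norm_num [show PySem.List.pyRange 0 (0 : Int) 1 = [] from by decide,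
        show PySem.List.pyRange 0 (1 : Int) 1 = [0] from by decide,
        show PySem.List.pyRange 0 (2 : Int) 1 = [0, 1] from by decide,
        show PySem.List.pyRange 0 (3 : Int) 1 = [0, 1, 2] from by decide,
        show PySem.List.pyRange 0 (4 : Int) 1 = [0, 1, 2, 3] from by decide,
        List.map, PySem.List.pyGet?, PySem.List.pyIdx?]
      ring_nf
      norm_num

-- ===== VERDICT (by name: the statement is the Claim_ definition above) =====
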